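-- pv_equiv track=rewrite | github.com/mosS-Green/plugins | aigent/indexing.py | extract_and_strip_imports
-- ===== SOURCE A (Python) =====
-- def extract_and_strip_imports(code: str) -> tuple[str, list]:
--     """
--     Strips top-level imports from a file and returns the clean code
--     along with a list of the imports found.
--     Handles both single-line and multi-line parenthesis imports.
--     """
--     lines = code.splitlines()
--     output = []
--     imports = []
--
--     in_import_parens = False
--     current_import = []
--
--     for line in lines:
--         if in_import_parens:
--             current_import.append(line)
--             if ")" in line.split("#")[0]:
--                 in_import_parens = False
--                 imports.append("\n".join(current_import))
--                 current_import = []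
--             continue
--
--         if line.startswith("import ") or line.startswith("from "):
--             code_part = line.split("#")[0]
--             if "(" in code_part and ")" not in code_part:
--                 in_import_parens = True
--                 current_import.append(line)
--             else:
--                 imports.append(line)
--             continue
--
--         output.append(line)
--
--     return "\n".join(output), imports
-- ===== SOURCE B (Python) =====
-- def extract_and_strip_imports(code: str) -> tuple[str, list]:
--     """Index-based rewrite: a nested loop consumes a parenthesised import
--     block locally instead of carrying flag state across iterations."""
--     lines = code.splitlines()
--     output = []
--     imports = []
--     i = 0
--     n = len(lines)
--     while i < n:
--         line = lines[i]
--         if line.startswith("import ") or line.startswith("from "):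
--             code_part = line.split("#")[0]
--             if "(" in code_part and ")" not in code_part:
--                 block = [line]
--                 i += 1
--                 while i < n and ")" not in lines[i].split("#")[0]:
--                     block.append(lines[i])
--                     i += 1
--                 if i < n:
--                     block.append(lines[i])
--                     imports.append("\n".join(block))
--                     i += 1
--                 # unterminated block at EOF is dropped (as in the original)
--             else:
--                 imports.append(line)
--                 i += 1
--         else:
--             output.append(line)
--             i += 1
--     return "\n".join(output), imports
-- ===== Notes on version B (the rewrite author's own statement) =====
-- stated objective: alternative
-- what changed: Replaces the cross-iteration in_import_parens/current_import flag state machine with an index-free structural recursion over the line list where a parenthesised import block is consumed by a localized inner scan (scan-ahead) instead of flag state.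
import Mathlib
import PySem

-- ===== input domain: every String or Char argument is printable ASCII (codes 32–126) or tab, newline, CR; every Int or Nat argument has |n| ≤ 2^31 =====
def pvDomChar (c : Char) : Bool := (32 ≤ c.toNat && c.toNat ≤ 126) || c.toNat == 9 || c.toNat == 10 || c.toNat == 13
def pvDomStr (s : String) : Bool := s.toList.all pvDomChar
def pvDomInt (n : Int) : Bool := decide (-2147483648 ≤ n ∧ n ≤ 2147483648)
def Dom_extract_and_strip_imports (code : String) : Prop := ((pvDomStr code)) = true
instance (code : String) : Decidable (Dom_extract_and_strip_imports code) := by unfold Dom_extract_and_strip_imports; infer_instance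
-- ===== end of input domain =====

-- B replaces A's flag state machine with a localized scan-ahead for the closing paren; same O(n) cost.

-- line.split("#")[0]  (split never returns an empty list, so headD "" is exact)
def pvCodePart (line : String) : String := (((PySem.Str.split? line "#").getD []).headD "")

-- ===== PORT A =====
-- the loop state (output, imports, in_import_parens, current_import)
def pvStepA (st : List String × List String × Bool × List String) (line : String) :
    List String × List String × Bool × List String :=
  let (output, imports, inP, cur) := st
  if inP then
    let cur := cur ++ [line]
    if PySem.Str.isIn ")" (pvCodePart line) then
      (output, imports ++ [PySem.Str.join "\n" cur], false, [])
    else (output, imports, true, cur)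
  else if PySem.Str.startswith line "import " || PySem.Str.startswith line "from " then
    let cp := pvCodePart line
    if PySem.Str.isIn "(" cp && !(PySem.Str.isIn ")" cp) then
      (output, imports, true, cur ++ [line])
    else (output, imports ++ [line], false, cur)
  else (output ++ [line], imports, inP, cur)

def extract_and_strip_imports (code : String) : String × List String :=
  let st := (PySem.Str.splitlines code).foldl pvStepA ([], [], false, [])
  (PySem.Str.join "\n" st.1, st.2.1)

-- ===== PORT B =====
-- inner while loop: accumulate lines into the block until one whose code part has ")"
def pvScanClose (ls : List String) (acc : List String) : Option (List String × List String) :=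
  match ls with
  | [] => none
  | l :: rest =>
    if PySem.Str.isIn ")" (pvCodePart l) then some (acc ++ [l], rest)
    else pvScanClose rest (acc ++ [l])

theorem pvScanClose_length : ∀ (ls acc b r : List String),
    pvScanClose ls acc = some (b, r) → r.length < ls.length := by
  intro ls
  induction ls with
  | nil => intro acc b r h; simp [pvScanClose] at h
  | cons l rest ih =>
    intro acc b r h
    simp only [pvScanClose] at h
    split at h
    · cases h; simp
    · have := ih _ _ _ h; simpa using Nat.lt_succ_of_lt this

def pvGoB : List String → List String × List String
  | [] => ([], [])
  | line :: rest =>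
    if PySem.Str.startswith line "import " || PySem.Str.startswith line "from " then
      let cp := pvCodePart line
      if PySem.Str.isIn "(" cp && !(PySem.Str.isIn ")" cp) then
        match h : pvScanClose rest [line] with
        | some (block, rest') =>
          let (o, i) := pvGoB rest'
          (o, PySem.Str.join "\n" block :: i)
        | none => ([], [])
      else
        let (o, i) := pvGoB rest
        (o, line :: i)
    else
      let (o, i) := pvGoB rest
      (line :: o, i)
termination_by ls => ls.length
decreasing_by
  · exact Nat.lt_succ_of_lt (pvScanClose_length _ _ _ _ h)
  · simp
  · simp

def extract_and_strip_imports_alt (code : String) : String × List String :=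
  let r := pvGoB (PySem.Str.splitlines code)
  (PySem.Str.join "\n" r.1, r.2)

-- ===== PRECONDITION & SPEC =====
def Spec_extract_and_strip_imports (code : String) (out : String × List String) : Prop := out = extract_and_strip_imports_alt code
instance (code : String) (out : String × List String) : Decidable (Spec_extract_and_strip_imports code out) := by unfold Spec_extract_and_strip_imports; infer_instance

-- ===== CLAIM (what is proved, stated in full; the proofs are below) =====
def Claim_equal_extract_and_strip_imports : Prop := ∀ (code : String), Dom_extract_and_strip_imports code → Spec_extract_and_strip_imports code (extract_and_strip_imports code)

-- ===== LEMMAS AND PROOFS =====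

-- A's loop while in_import_parens, related to B's inner scan
theorem foldA_parens : ∀ (ls cur output imports : List String),
    ls.foldl pvStepA (output, imports, true, cur) =
      match pvScanClose ls cur with
      | some (b, r) => r.foldl pvStepA (output, imports ++ [PySem.Str.join "\n" b], false, [])
      | none => (output, imports, true, cur ++ ls) := by
  intro ls
  induction ls with
  | nil => intro cur output imports; simp [pvScanClose]
  | cons l rest ih =>
    intro cur output imports
    by_cases h : PySem.Str.isIn ")" (pvCodePart l) = true
    · simp only [List.foldl_cons, pvStepA, h, if_true, pvScanClose]
    · simp only [List.foldl_cons, pvStepA, h, if_false, Bool.false_eq_true, if_true, pvScanClose]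
      rw [ih]
      cases hs : pvScanClose rest (cur ++ [l]) <;> simp

-- main invariant: A's fold from a clean state equals B's recursion (on output and imports)
theorem main_inv : ∀ (ls output imports : List String),
    ((ls.foldl pvStepA (output, imports, false, [])).1,
     (ls.foldl pvStepA (output, imports, false, [])).2.1) =
      (output ++ (pvGoB ls).1, imports ++ (pvGoB ls).2) := by
  intro ls
  induction ls using pvGoB.induct with
  | case1 => intro output imports; simp [pvGoB]
  | case2 l rest himp cp hp block rest' hscan o i hg ih =>
    intro output imports
    have hp' : (PySem.Str.isIn "(" (pvCodePart l) && !PySem.Str.isIn ")" (pvCodePart l)) = true := hp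
    have hB : pvGoB (l :: rest) = ((pvGoB rest').1, PySem.Str.join "\n" block :: (pvGoB rest').2) := by
      rw [pvGoB]
      simp only [himp, hp', if_true]
      split
      · next b r hsc2 =>
        rw [hscan] at hsc2
        injection hsc2 with e
        injection e with e1 e2
        subst e1; subst e2; rfl
      · next hsc2 => rw [hscan] at hsc2; exact absurd hsc2 (by simp)
    simp only [List.foldl_cons, pvStepA, himp, hp', Bool.false_eq_true, if_false, if_true,
      List.nil_append]
    rw [foldA_parens, hscan]
    have hih := ih output (imports ++ [PySem.Str.join "\n" block])
    rw [hB]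
    simp only [Prod.mk.injEq] at hih ⊢
    exact ⟨hih.1, by rw [hih.2]; simp⟩
  | case3 l rest himp cp hp hscan =>
    intro output imports
    have hp' : (PySem.Str.isIn "(" (pvCodePart l) && !PySem.Str.isIn ")" (pvCodePart l)) = true := hp
    have hB : pvGoB (l :: rest) = ([], []) := by
      rw [pvGoB]
      simp only [himp, hp', if_true]
      split
      · next b r hsc2 => rw [hscan] at hsc2; exact absurd hsc2 (by simp)
      · rfl
    simp only [List.foldl_cons, pvStepA, himp, hp', Bool.false_eq_true, if_false, if_true,
      List.nil_append]
    rw [foldA_parens, hscan, hB]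
    simp
  | case4 l rest himp cp hp o i hg ih =>
    intro output imports
    have hp' : ¬ (PySem.Str.isIn "(" (pvCodePart l) && !PySem.Str.isIn ")" (pvCodePart l)) = true := hp
    have hB : pvGoB (l :: rest) = ((pvGoB rest).1, l :: (pvGoB rest).2) := by
      rw [pvGoB]
      simp only [himp, if_true]
      rw [if_neg hp']
    simp only [List.foldl_cons, pvStepA, himp, Bool.false_eq_true, if_false, if_true]
    rw [if_neg hp', hB]
    have hih := ih output (imports ++ [l])
    simp only [Prod.mk.injEq] at hih ⊢
    exact ⟨hih.1, by rw [hih.2]; simp⟩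
  | case5 l rest himp o i hg ih =>
    intro output imports
    simp only [List.foldl_cons, pvStepA, himp, Bool.false_eq_true, if_false]
    rw [pvGoB]
    simp only [himp, hg]
    have := ih (output ++ [l]) imports
    rw [hg] at this
    simp_all

-- ===== VERDICT (by name: the statement is the Claim_ definition above) =====
theorem extract_and_strip_imports_spec : Claim_equal_extract_and_strip_imports := by
  intro code _
  unfold Spec_extract_and_strip_imports extract_and_strip_imports extract_and_strip_imports_alt
  have := main_inv (PySem.Str.splitlines code) [] []
  cases hf : (PySem.Str.splitlines code).foldl pvStepA ([], [], false, []) with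
  | mk o rest =>
    rw [hf] at this
    cases hg : pvGoB (PySem.Str.splitlines code) with
    | mk o' i' => rw [hg] at this; simp_all
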